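-- pv_equiv track=rewrite | github.com/JayOfferdahl/eecs690 | mlem2.py | calculateConcepts
-- ===== SOURCE A (Python) =====
-- from collections import OrderedDict
--
-- def calculateConcepts(universe):
--     concepts = OrderedDict()
--
--     # For every case in the universe, add the case number to the concept set it belongs
--     for index, case in enumerate(universe):
--         decision = case[-1]
--
--         if decision in concepts:
--             concepts[decision].add(index)
--         else:
--             concepts[decision] = set([index])
--
--     # For simplicity, sort each concept
--     for key, value in concepts.items():
--         concepts[key] = sorted(value, key = int)
--
--     return concepts
-- ===== SOURCE B (Python) =====
-- from collections import OrderedDict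
--
-- def calculateConcepts(universe):
--     universe = list(universe)
--
--     # First pass: distinct decision values in order of first appearance
--     order = []
--     for case in universe:
--         decision = case[-1]
--         if decision not in order:
--             order.append(decision)
--
--     # For each decision, one enumerate pass collecting matching indices
--     # (indices come out already increasing, so no sort is needed)
--     return OrderedDict(
--         (decision, [index for index, case in enumerate(universe) if case[-1] == decision])
--         for decision in order
--     )
-- ===== Notes on version B (the rewrite author's own statement) =====
-- stated objective: alternative
-- what changed: A builds a dict of index-sets in one pass and then sorts each set; B first collects the distinct decision values in order of first appearance and then, per decision, makes a fresh enumerate pass collecting matching indices, which are already increasing so no sets and no sorting are needed.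
import Mathlib
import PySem

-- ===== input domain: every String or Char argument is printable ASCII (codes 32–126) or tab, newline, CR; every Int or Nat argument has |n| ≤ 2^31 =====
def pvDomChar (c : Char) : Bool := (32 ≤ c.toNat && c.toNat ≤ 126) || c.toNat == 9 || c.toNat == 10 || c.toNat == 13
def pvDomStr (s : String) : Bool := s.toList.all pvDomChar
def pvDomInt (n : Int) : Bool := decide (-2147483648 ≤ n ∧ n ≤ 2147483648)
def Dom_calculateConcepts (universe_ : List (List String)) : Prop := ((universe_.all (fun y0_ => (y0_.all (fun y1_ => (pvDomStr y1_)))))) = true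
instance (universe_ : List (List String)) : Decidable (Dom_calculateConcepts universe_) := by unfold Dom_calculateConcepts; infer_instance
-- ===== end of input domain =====

-- B replaces A's dict-of-sets-then-sort with a first-appearance pass over the decision
-- values followed by one filtering enumerate pass per decision (alternative decomposition).
-- Both programs raise IndexError on an empty case; Pre_ excludes those inputs.

-- ===== PORT A =====
-- case[-1]; total form (Pre_ excludes the raising case = []).
def pvDec (case : List String) : String := (PySem.List.pyGet? case (-1)).getD ""

def calculateConcepts (universe_ : List (List String)) : List (String × List Int) :=
  let concepts : PySem.Dict String (PySem.Set Int) :=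
    (PySem.List.enumerate universe_).foldl
      (fun cs p =>
        let decision := pvDec p.2
        if cs.contains decision then
          -- concepts[decision].add(index)
          cs.modify decision PySem.Set.empty (fun s => PySem.Set.add s p.1)
        else
          cs.insert decision (PySem.Set.ofList [p.1]))
      PySem.Dict.empty
  -- second loop: concepts[key] = sorted(value, key=int); key=int is the identity on ints
  concepts.items.map (fun kv => (kv.1, PySem.List.sorted kv.2 (fun x => x) false))

-- ===== PORT B =====
def calculateConcepts_alt (universe_ : List (List String)) : List (String × List Int) :=
  let order : List String :=
    universe_.foldl
      (fun acc case =>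
        let decision := pvDec case
        if acc.contains decision then acc else acc ++ [decision])
      []
  order.map (fun decision =>
    (decision,
     (PySem.List.enumerate universe_).filterMap
       (fun p => if pvDec p.2 == decision then some p.1 else none)))

-- ===== PRECONDITION & SPEC =====
-- Pre_ excludes inputs containing an empty case, on which the Python raises IndexError at case[-1].
def Pre_calculateConcepts (universe_ : List (List String)) : Prop :=
  ∀ c ∈ universe_, c ≠ []
instance (universe_ : List (List String)) : Decidable (Pre_calculateConcepts universe_) := by
  unfold Pre_calculateConcepts; infer_instance

def pvWitness_calculateConcepts : List (List String) :=
  [["a", "x"], ["b", "y"], ["c", "x"]]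

def Spec_calculateConcepts (universe_ : List (List String)) (out : List (String × List Int)) : Prop := out = calculateConcepts_alt universe_
instance (universe_ : List (List String)) (out : List (String × List Int)) : Decidable (Spec_calculateConcepts universe_ out) := by unfold Spec_calculateConcepts; infer_instance

-- ===== CLAIM (what is proved, stated in full; the proofs are below) =====
def Claim_equal_calculateConcepts : Prop := ∀ (universe_ : List (List String)), Dom_calculateConcepts universe_ → Pre_calculateConcepts universe_ → Spec_calculateConcepts universe_ (calculateConcepts universe_)

-- ===== LEMMAS AND PROOFS =====

-- A's loop step is exactly Dict.modify (both branches coincide with it).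
theorem pvStepA_eq_modify (cs : PySem.Dict String (PySem.Set Int)) (p : Int × List String) :
    (if cs.contains (pvDec p.2) then
        cs.modify (pvDec p.2) PySem.Set.empty (fun s => PySem.Set.add s p.1)
      else cs.insert (pvDec p.2) (PySem.Set.ofList [p.1])) =
    cs.modify (pvDec p.2) PySem.Set.empty (fun s => PySem.Set.add s p.1) := by
  by_cases h : cs.contains (pvDec p.2)
  · simp [h]
  · simp [h, PySem.Dict.modify, PySem.Set.ofList, PySem.Set.empty, PySem.Set.add,
      PySem.Dict.getD_of_not_contains cs ([] : PySem.Set Int) (by simpa using h)]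

-- the value accumulated for key c by the modify loop
theorem pvGetD_groupFold (l : List (Int × List String)) (d : PySem.Dict String (PySem.Set Int))
    (c : String) :
    (l.foldl (fun cs p => cs.modify (pvDec p.2) PySem.Set.empty (fun s => PySem.Set.add s p.1)) d).getD c PySem.Set.empty
    = (l.filter (fun p => pvDec p.2 == c)).foldl (fun s p => PySem.Set.add s p.1)
        (d.getD c PySem.Set.empty) := by
  induction l generalizing d with
  | nil => rfl
  | cons p l ih =>
    rw [List.foldl_cons, List.filter_cons]
    by_cases h : pvDec p.2 = c
    · subst h
      rw [if_pos (by simp), List.foldl_cons, ih, PySem.Dict.getD_modify_self]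
    · have hb : (pvDec p.2 == c) = false := by simpa using h
      simp only [hb, Bool.false_eq_true, if_false, ih,
        PySem.Dict.getD_modify_of_ne d PySem.Set.empty _ (Ne.symm h)]

theorem calculateConcepts_eq_alt (universe_ : List (List String))
    : calculateConcepts universe_ = calculateConcepts_alt universe_ := by
  classical
  unfold calculateConcepts calculateConcepts_alt
  simp only []
  -- rewrite A's loop step to the pure modify loop
  have hstep :
      (PySem.List.enumerate universe_).foldl
        (fun cs p =>
          let decision := pvDec p.2
          if cs.contains decision then
            cs.modify decision PySem.Set.empty (fun s => PySem.Set.add s p.1)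
          else cs.insert decision (PySem.Set.ofList [p.1]))
        PySem.Dict.empty
      = (PySem.List.enumerate universe_).foldl
          (fun cs p => cs.modify (pvDec p.2) PySem.Set.empty (fun s => PySem.Set.add s p.1))
          PySem.Dict.empty := by
    exact List.foldl_ext _ _ _ (fun cs p _ => pvStepA_eq_modify cs p)
  rw [hstep]
  set F := (PySem.List.enumerate universe_).foldl
      (fun cs p => cs.modify (pvDec p.2) PySem.Set.empty (fun s => PySem.Set.add s p.1))
      PySem.Dict.empty with hF
  -- keys of the grouping fold = first-appearance list of decisions = B's order list
  have hkeysF : F.keys = PySem.Set.ofList (universe_.map pvDec) := by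
    rw [hF, PySem.Dict.keys_foldl_modify_key (PySem.List.enumerate universe_)
      (fun p => pvDec p.2) PySem.Set.empty (fun _ p => fun s => PySem.Set.add s p.1)
      PySem.Dict.empty]
    simp only [PySem.Set.update, PySem.Set.ofList_eq_foldl, PySem.Dict.keys_empty]
    conv_rhs => rw [← PySem.List.map_snd_enumerate universe_ 0, List.map_map]
    rfl
  have horder :
      universe_.foldl
        (fun acc case =>
          let decision := pvDec case
          if acc.contains decision then acc else acc ++ [decision]) []
      = PySem.Set.ofList (universe_.map pvDec) := by
    rw [PySem.Set.ofList_eq_foldl, List.foldl_map]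
    rfl
  have hnodup : F.keys.Nodup := by rw [hkeysF]; exact PySem.Set.nodup_ofList _
  -- items of F as a map over its keys
  rw [PySem.Dict.items_eq_map_keys F hnodup PySem.Set.empty, horder, ← hkeysF,
    List.map_map]
  apply List.map_congr_left
  intro c _
  simp only [Function.comp]
  refine congrArg (fun v => (c, v)) ?_
  -- per-key value: sorted set of indices = filtered index list (already increasing)
  rw [hF, pvGetD_groupFold]
  simp only [PySem.Dict.getD_empty]
  have hfil :
      (PySem.List.enumerate universe_).filterMap
        (fun p => if pvDec p.2 == c then some p.1 else none)
      = ((PySem.List.enumerate universe_).filter (fun p => pvDec p.2 == c)).map (·.1) := by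
    induction PySem.List.enumerate universe_ with
    | nil => rfl
    | cons p l ih =>
      cases h : (pvDec p.2 == c) with
      | true =>
        simp only [List.filterMap_cons, List.filter_cons, h, if_true, List.map_cons, ih]
      | false =>
        simp only [List.filterMap_cons, List.filter_cons, h, Bool.false_eq_true, if_false, ih]
  rw [hfil]
  set L := ((PySem.List.enumerate universe_).filter (fun p => pvDec p.2 == c)).map (·.1)
    with hL
  have hlt : L.Pairwise (· < ·) := by
    rw [hL]
    exact List.Pairwise.map _ (fun a b h => h)
      (List.Pairwise.sublist List.filter_sublist (PySem.List.pairwise_lt_enumerate universe_ 0))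
  have hfold :
      ((PySem.List.enumerate universe_).filter (fun p => pvDec p.2 == c)).foldl
        (fun s p => PySem.Set.add s p.1) PySem.Set.empty = PySem.Set.ofList L := by
    rw [PySem.Set.ofList_eq_foldl, hL, List.foldl_map]
    rfl
  have hnd : L.Nodup := hlt.imp (fun h => ne_of_lt h)
  rw [hfold, PySem.Set.ofList_eq_self_of_nodup L hnd]
  exact PySem.List.sorted_eq_self_of_pairwise L _ (hlt.imp le_of_lt)

-- ===== VERDICT (by name: the statement is the Claim_ definition above) =====
theorem calculateConcepts_spec : Claim_equal_calculateConcepts := by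
  intro universe_ _ _
  unfold Spec_calculateConcepts
  exact calculateConcepts_eq_alt universe_
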